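-- pv_equiv track=rewrite | github.com/MrBrantCode/unitest_baseline | mut_generate/mist_train_taco/taco_10439/solution.py | find_maximum_stair_sequence
-- ===== SOURCE A (Python) =====
-- from itertools import groupby
--
-- def find_maximum_stair_sequence(m, cards):
--     # Sort the cards and remove duplicates by keeping only the last occurrence
--     tab = sorted(cards)
--     while len(tab) > 1 and tab[-1] == tab[-2]:
--         tab.pop()
--
--     # Initialize result and S lists
--     result = []
--     S = []
--
--     # Group by unique numbers and process each group
--     for num, iter_elems in groupby(tab):
--         amount = len(list(iter_elems))
--         if amount > 1:
--             result += [num]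
--             S += [num]
--         else:
--             result += [num]
--
--     # Add the descending part of the stair sequence
--     for x in S[-1::-1]:
--         result += [x]
--
--     # Return the maximum length and the resulting stair sequence
--     return len(result), result
-- ===== SOURCE B (Python) =====
-- def find_maximum_stair_sequence(m, cards):
--     seen = set()
--     dups = set()
--     for c in cards:
--         if c in seen:
--             dups.add(c)
--         else:
--             seen.add(c)
--     if not seen:
--         return 0, []
--     dups.discard(max(seen))
--     result = sorted(seen) + sorted(dups, reverse=True)
--     return len(result), result
-- ===== Notes on version B (the rewrite author's own statement) =====
-- stated objective: alternative
-- what changed: Replaced A's full multiset sort + pop-trailing-duplicates while-loop + groupby run counting by a one-pass seen/dups set split (no counting at all) followed by two independent sorts: ascending over the distinct values and descending over the duplicated values minus the maximum.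
import Mathlib
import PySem

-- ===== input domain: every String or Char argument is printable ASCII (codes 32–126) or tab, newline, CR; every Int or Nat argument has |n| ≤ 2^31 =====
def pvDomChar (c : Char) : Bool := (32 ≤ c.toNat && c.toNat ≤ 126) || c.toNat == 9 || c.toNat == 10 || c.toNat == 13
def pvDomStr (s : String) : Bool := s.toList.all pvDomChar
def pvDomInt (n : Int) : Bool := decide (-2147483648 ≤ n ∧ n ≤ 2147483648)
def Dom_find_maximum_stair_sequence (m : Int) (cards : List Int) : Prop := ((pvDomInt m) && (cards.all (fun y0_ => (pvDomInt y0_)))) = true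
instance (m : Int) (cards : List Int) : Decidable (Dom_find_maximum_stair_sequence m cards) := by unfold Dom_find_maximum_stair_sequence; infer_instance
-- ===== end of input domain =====

-- B replaces A's full-sort + pop-trailing-duplicates while-loop + groupby counting by a one-pass
-- seen/dups set split (no counting) and two independent sorts (objective: alternative).

-- ===== PORT A =====
-- `while len(tab) > 1 and tab[-1] == tab[-2]: tab.pop()`  (tab.pop() removes the last element = dropLast)
def pvPopWhile (tab : List Int) : List Int :=
  if 1 < tab.length ∧ PySem.List.pyGetD tab (-1) 0 = PySem.List.pyGetD tab (-2) 0 then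
    pvPopWhile tab.dropLast
  else tab
termination_by tab.length
decreasing_by simp_all [List.length_dropLast]; omega

-- `for num, iter_elems in groupby(tab): amount = len(list(iter_elems))` — consecutive runs with their lengths
def pvRuns (l : List Int) : List (Int × Int) :=
  match l with
  | [] => []
  | x :: xs => (x, 1 + ((xs.takeWhile (fun y => y == x)).length : Int)) :: pvRuns (xs.dropWhile (fun y => y == x))
termination_by l.length
decreasing_by
  simp only [List.length_cons]
  exact Nat.lt_succ_of_le (List.length_dropWhile_le _ _)

def find_maximum_stair_sequence (m : Int) (cards : List Int) : Int × List Int :=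
  let tab := pvPopWhile (PySem.List.sorted cards (fun x => x) false)
  -- the groupby loop, carrying (result, S)
  let rs := (pvRuns tab).foldl
    (fun (p : List Int × List Int) g =>
      if g.2 > 1 then (p.1 ++ [g.1], p.2 ++ [g.1]) else (p.1 ++ [g.1], p.2))
    ([], [])
  -- `for x in S[-1::-1]: result += [x]`
  let result := rs.1 ++ ((PySem.List.slice? rs.2 (some (-1)) none (-1)).getD [])
  (PySem.List.len result, result)

-- ===== PORT B =====
def find_maximum_stair_sequence_alt (m : Int) (cards : List Int) : Int × List Int :=
  -- one pass: split the cards into the set of seen values and the set of duplicated values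
  let p := cards.foldl
    (fun (p : PySem.Set Int × PySem.Set Int) c =>
      if PySem.Set.contains p.1 c then (p.1, PySem.Set.add p.2 c)
      else (PySem.Set.add p.1 c, p.2))
    (PySem.Set.empty, PySem.Set.empty)
  let seen := p.1
  if seen = [] then (0, [])
  else
    -- `dups.discard(max(seen))`
    let dups := PySem.Set.discard p.2 ((PySem.List.max? seen (fun x => x)).getD 0)
    -- `sorted(seen) + sorted(dups, reverse=True)`
    let result := PySem.List.sorted seen (fun x => x) false ++ PySem.List.sorted dups (fun x => x) true
    (PySem.List.len result, result)

-- ===== PRECONDITION & SPEC =====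
def Spec_find_maximum_stair_sequence (m : Int) (cards : List Int) (out : Int × List Int) : Prop := out = find_maximum_stair_sequence_alt m cards
instance (m : Int) (cards : List Int) (out : Int × List Int) : Decidable (Spec_find_maximum_stair_sequence m cards out) := by unfold Spec_find_maximum_stair_sequence; infer_instance

-- ===== CLAIM (what is proved, stated in full; the proofs are below) =====
def Claim_equal_find_maximum_stair_sequence : Prop := ∀ (m : Int) (cards : List Int), Dom_find_maximum_stair_sequence m cards → Spec_find_maximum_stair_sequence m cards (find_maximum_stair_sequence m cards)

-- ===== LEMMAS AND PROOFS =====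

-- s[-1::-1] is reverse (as is s[::-1])
theorem pvSlice_from_neg_one_rev (l : List Int) : PySem.List.slice? l (some (-1)) none (-1) = some l.reverse := by
  have h : PySem.List.sliceIndices l.length (some (-1)) none (-1) = PySem.List.sliceIndices l.length none none (-1) := by
    simp [PySem.List.sliceIndices]; omega
  have h2 : PySem.List.slice? l (some (-1)) none (-1) = PySem.List.slice? l none none (-1) := by
    simp only [PySem.List.slice?, h]
  rw [h2, PySem.List.slice?_none_none_neg_one]

-- A's loop over the runs: result collects every num, S collects the nums of runs longer than 1
theorem pvFoldA (l : List (Int × Int)) (r0 s0 : List Int) :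
    l.foldl (fun (p : List Int × List Int) g =>
      if g.2 > 1 then (p.1 ++ [g.1], p.2 ++ [g.1]) else (p.1 ++ [g.1], p.2)) (r0, s0)
    = (r0 ++ l.map (·.1), s0 ++ (l.filter (fun g => g.2 > 1)).map (·.1)) := by
  induction l generalizing r0 s0 with
  | nil => simp
  | cons g t ih => by_cases h : g.2 > 1 <;> simp [h, ih]

-- B's one pass: the first set collects every value, the second the values seen at least twice
theorem pvScan (l : List Int) (s d : PySem.Set Int) (hs : s.Nodup) (hd : d.Nodup) :
    (l.foldl (fun (p : PySem.Set Int × PySem.Set Int) c =>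
        if PySem.Set.contains p.1 c then (p.1, PySem.Set.add p.2 c)
        else (PySem.Set.add p.1 c, p.2)) (s, d)).1.Nodup
    ∧ (l.foldl (fun (p : PySem.Set Int × PySem.Set Int) c =>
        if PySem.Set.contains p.1 c then (p.1, PySem.Set.add p.2 c)
        else (PySem.Set.add p.1 c, p.2)) (s, d)).2.Nodup
    ∧ (∀ v, v ∈ (l.foldl (fun (p : PySem.Set Int × PySem.Set Int) c =>
        if PySem.Set.contains p.1 c then (p.1, PySem.Set.add p.2 c)
        else (PySem.Set.add p.1 c, p.2)) (s, d)).1 ↔ v ∈ s ∨ v ∈ l)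
    ∧ (∀ v, v ∈ (l.foldl (fun (p : PySem.Set Int × PySem.Set Int) c =>
        if PySem.Set.contains p.1 c then (p.1, PySem.Set.add p.2 c)
        else (PySem.Set.add p.1 c, p.2)) (s, d)).2 ↔ v ∈ d ∨ (v ∈ s ∧ v ∈ l) ∨ 2 ≤ l.count v) := by
  induction l generalizing s d with
  | nil => simp [hs, hd]
  | cons c t ih =>
    simp only [List.foldl_cons]
    by_cases hc : c ∈ s
    · rw [if_pos (by simpa [PySem.Set.contains] using hc)]
      obtain ⟨h1, h2, h3, h4⟩ := ih s (d.add c) hs (PySem.Set.nodup_add d c hd)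
      refine ⟨h1, h2, ?_, ?_⟩
      · intro v
        rw [h3 v, List.mem_cons]
        constructor
        · rintro (hv | hv)
          · exact .inl hv
          · exact .inr (.inr hv)
        · rintro (hv | rfl | hv)
          · exact .inl hv
          · exact .inl hc
          · exact .inr hv
      · intro v
        rw [h4 v, PySem.Set.mem_add]
        by_cases hvc : v = c
        · constructor
          · intro _; exact .inr (.inl ⟨hvc ▸ hc, hvc ▸ List.mem_cons_self⟩)
          · intro _; exact .inl (.inr hvc)
        · have hcnt : (c :: t).count v = t.count v := by simp [Ne.symm hvc]
          have hvin : v ∈ c :: t ↔ v ∈ t := by simp [List.mem_cons, hvc]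
          rw [hcnt, hvin]
          tauto
    · rw [if_neg (by simpa [PySem.Set.contains] using hc)]
      obtain ⟨h1, h2, h3, h4⟩ := ih (s.add c) d (PySem.Set.nodup_add s c hs) hd
      refine ⟨h1, h2, ?_, ?_⟩
      · intro v
        rw [h3 v, PySem.Set.mem_add, List.mem_cons]
        tauto
      · intro v
        rw [h4 v, PySem.Set.mem_add]
        by_cases hvc : v = c
        · have hcnt : (c :: t).count v = t.count v + 1 := by simp [hvc]
          have hmemt : v ∈ t ↔ 0 < t.count v := List.count_pos_iff.symm
          have h6 : (2 ≤ (c :: t).count v) ↔ (v ∈ t ∨ 2 ≤ t.count v) := by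
            rw [hcnt]
            constructor
            · intro h; exact .inl (hmemt.mpr (by omega))
            · rintro (h | h)
              · have := hmemt.mp h; omega
              · omega
          have h7 : v ∉ s := fun h => hc (hvc ▸ h)
          rw [h6]
          tauto
        · have hcnt : (c :: t).count v = t.count v := by simp [Ne.symm hvc]
          have hvin : v ∈ c :: t ↔ v ∈ t := by simp [List.mem_cons, hvc]
          rw [hcnt, hvin]
          tauto

-- run decomposition of a sorted nonempty list: a strictly smaller prefix and the maximal run
theorem pvRunDecomp (t : List Int) (hs : t.Pairwise (· ≤ ·)) (hne : t ≠ []) :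
    ∃ u x k, t = u ++ List.replicate (k + 1) x ∧ ∀ y ∈ u, y < x := by
  induction t with
  | nil => exact absurd rfl hne
  | cons a rest ih =>
    rcases List.pairwise_cons.mp hs with ⟨ha, hrest⟩
    rcases eq_or_ne rest [] with h | h
    · exact ⟨[], a, 0, by simp [h], by simp⟩
    · obtain ⟨u, x, k, heq, hu⟩ := ih hrest h
      rcases lt_or_ge a x with hax | hax
      · exact ⟨a :: u, x, k, by simp [heq], by
          intro y hy
          rcases List.mem_cons.mp hy with rfl | hy
          · exact hax
          · exact hu y hy⟩
      · have hxmem : x ∈ rest := by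
          rw [heq]; exact List.mem_append_right _ (List.mem_replicate.mpr ⟨Nat.succ_ne_zero _, rfl⟩)
        have hax' : a = x := le_antisymm (ha x hxmem) hax
        have hunil : u = [] := by
          rcases u with _ | ⟨b, u'⟩
          · rfl
          · exfalso
            have hb : b ∈ rest := by rw [heq]; simp
            have := ha b hb
            have := hu b (by simp)
            omega
        subst hax'
        exact ⟨[], a, k + 1, by simp [heq, hunil, List.replicate_succ], by simp⟩

-- popWhile on such a decomposition keeps one copy of the maximum
theorem pvPopWhile_spec (u : List Int) (x : Int) (k : Nat) (hu : ∀ y ∈ u, y < x) :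
    pvPopWhile (u ++ List.replicate (k + 1) x) = u ++ [x] := by
  induction k with
  | zero =>
    rw [pvPopWhile]
    rcases u.eq_nil_or_concat with rfl | ⟨u', b, rfl⟩
    · simp
    · have hb : b < x := hu b (by simp)
      have hneg : ¬ (1 < (u'.concat b ++ List.replicate (0 + 1) x).length ∧
          PySem.List.pyGetD (u'.concat b ++ List.replicate (0 + 1) x) (-1) 0 =
          PySem.List.pyGetD (u'.concat b ++ List.replicate (0 + 1) x) (-2) 0) := by
        rintro ⟨hlen, heq⟩
        have h1 : PySem.List.pyGetD (u'.concat b ++ List.replicate (0 + 1) x) (-1) 0 = x := by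
          rw [show u'.concat b ++ List.replicate (0 + 1) x = (u' ++ [b]) ++ [x] by simp]
          rw [PySem.List.pyGetD_neg_one_append_singleton]
        have h2 : PySem.List.pyGetD (u'.concat b ++ List.replicate (0 + 1) x) (-2) 0 = b := by
          have hlen2 : (u'.concat b ++ List.replicate (0 + 1) x).length = u'.length + 2 := by simp
          rw [PySem.List.pyGetD_neg_ofNat _ 2 0 (by omega) (by omega)]
          simp only [hlen2]
          have h3 : u'.length + 2 - 2 = u'.length := by omega
          simp only [h3, List.concat_eq_append]
          rw [List.getElem_append_left (by simp)]
          rw [List.getElem_append_right (by omega)]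
          simp
        rw [h1, h2] at heq
        omega
      rw [if_neg hneg]
      simp
  | succ n ih =>
    rw [pvPopWhile]
    have hsplit : u ++ List.replicate (n + 2) x = (u ++ List.replicate (n + 1) x) ++ [x] := by
      conv_lhs => rw [show n+2 = (n+1)+1 from rfl, List.replicate_succ']
      exact (List.append_assoc _ _ _).symm
    rw [if_pos, hsplit, List.dropLast_concat, ih]
    constructor
    · simp; omega
    · rw [hsplit, PySem.List.pyGetD_neg_one_append_singleton]
      have hlen2 : ((u ++ List.replicate (n + 1) x) ++ [x]).length = u.length + n + 2 := by simp; omega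
      rw [PySem.List.pyGetD_neg_ofNat _ 2 0 (by omega) (by omega)]
      simp only [hlen2]
      have : u.length + n + 2 - 2 = u.length + n := by omega
      simp only [this]
      rw [List.getElem_append_left (by simp)]
      rw [List.getElem_append_right (by omega)]
      simp

-- after the run of x is dropped everything is strictly above x (in a sorted list)
theorem pvDropWhile_gt (x : Int) (xs : List Int) (hs : xs.Pairwise (· ≤ ·)) (hx : ∀ y ∈ xs, x ≤ y) :
    ∀ y ∈ xs.dropWhile (fun y => y == x), x < y := by
  induction xs with
  | nil => simp
  | cons a as ih =>
    rcases List.pairwise_cons.mp hs with ⟨ha, has⟩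
    by_cases hax : a = x
    · subst hax
      rw [List.dropWhile_cons_of_pos (by simp)]
      exact ih has (fun y hy => ha y hy)
    · rw [List.dropWhile_cons_of_neg (by simp [hax])]
      intro y hy
      rcases List.mem_cons.mp hy with rfl | hy
      · exact lt_of_le_of_ne (hx y (by simp)) (Ne.symm hax)
      · exact lt_of_lt_of_le (lt_of_le_of_ne (hx a (by simp)) (Ne.symm hax)) (ha y hy)

-- properties of pvRuns on a sorted list: run lengths are counts, nums strictly increase, same members
theorem pvRuns_props (t : List Int) (hs : t.Pairwise (· ≤ ·)) :
    (∀ p ∈ pvRuns t, p.2 = (t.count p.1 : Int))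
    ∧ ((pvRuns t).map (·.1)).Pairwise (· < ·)
    ∧ (∀ v, v ∈ (pvRuns t).map (·.1) ↔ v ∈ t) := by
  induction t using pvRuns.induct with
  | case1 => simp [pvRuns]
  | case2 x xs ih =>
    rcases List.pairwise_cons.mp hs with ⟨hx, hxs⟩
    have hdw_sorted : (xs.dropWhile (fun y => y == x)).Pairwise (· ≤ ·) :=
      List.Pairwise.sublist (List.dropWhile_sublist _) hxs
    have hdw_gt : ∀ y ∈ xs.dropWhile (fun y => y == x), x < y := pvDropWhile_gt x xs hxs hx
    have htw_eq : ∀ y ∈ xs.takeWhile (fun y => y == x), y = x := by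
      intro y hy
      simpa using List.mem_takeWhile_imp hy
    obtain ⟨ihc, ihp, ihm⟩ := ih hdw_sorted
    have hsplit := List.takeWhile_append_dropWhile (p := fun y => y == x) (l := xs)
    have hcnt : ∀ v, xs.count v = (xs.takeWhile (fun y => y == x)).count v + (xs.dropWhile (fun y => y == x)).count v := by
      intro v
      conv_lhs => rw [← hsplit]
      exact List.count_append ..
    have hmemdw : ∀ {v}, v ∈ (pvRuns (xs.dropWhile (fun y => y == x))).map (·.1) → x < v := by
      intro v hv
      exact hdw_gt v ((ihm v).mp hv)
    rw [pvRuns]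
    refine ⟨?_, ?_, ?_⟩
    · intro p hp
      rcases List.mem_cons.mp hp with rfl | hp
      · simp only [List.count_cons_self]
        have h1 : xs.count x = (xs.takeWhile (fun y => y == x)).length := by
          rw [hcnt x]
          have h2 : (xs.takeWhile (fun y => y == x)).count x = (xs.takeWhile (fun y => y == x)).length :=
            List.count_eq_length.mpr (fun b hb => (htw_eq b hb).symm)
          have h3 : (xs.dropWhile (fun y => y == x)).count x = 0 :=
            List.count_eq_zero.mpr (fun hmem => absurd (hdw_gt x hmem) (lt_irrefl x))
          omega
        rw [h1]; push_cast; ring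
      · have hgt : x < p.1 := hmemdw (List.mem_map_of_mem hp)
        rw [ihc p hp]
        have h3 : (xs.takeWhile (fun y => y == x)).count p.1 = 0 :=
          List.count_eq_zero.mpr (fun hmem => absurd (htw_eq p.1 hmem) (by intro h; omega))
        have h5 : (x :: xs).count p.1 = xs.count p.1 := by
          rw [List.count_cons_of_ne (by omega)]
        rw [h5, hcnt p.1, h3]
        push_cast; ring
    · simp only [List.map_cons]
      exact List.pairwise_cons.mpr ⟨fun v hv => hmemdw hv, ihp⟩
    · intro v
      simp only [List.map_cons, List.mem_cons, ihm v]
      constructor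
      · rintro (rfl | hv)
        · exact .inl rfl
        · exact .inr ((List.dropWhile_sublist _).mem hv)
      · rintro (rfl | hv)
        · exact .inl rfl
        · conv at hv => rw [← hsplit]
          rcases List.mem_append.mp hv with h | h
          · exact .inl (htw_eq v h)
          · exact .inr h

theorem find_maximum_stair_sequence_spec : Claim_equal_find_maximum_stair_sequence := by
  intro m cards _
  unfold Spec_find_maximum_stair_sequence
  unfold find_maximum_stair_sequence find_maximum_stair_sequence_alt
  dsimp only
  obtain ⟨hsn, hdn, hsm, hdm⟩ := pvScan cards PySem.Set.empty PySem.Set.empty (by simp [PySem.Set.empty]) (by simp [PySem.Set.empty])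
  set P := cards.foldl
    (fun (p : PySem.Set Int × PySem.Set Int) c =>
      if PySem.Set.contains p.1 c then (p.1, PySem.Set.add p.2 c)
      else (PySem.Set.add p.1 c, p.2))
    (PySem.Set.empty, PySem.Set.empty) with hPdef
  simp only [PySem.Set.empty, List.not_mem_nil, false_or, false_and] at hsm hdm
  rcases eq_or_ne cards [] with rfl | hc
  · have h0 : PySem.List.sorted ([]:List Int) (fun x => x) false = [] := by
      rw [PySem.List.sorted_eq_nil_iff]
    rw [h0, show pvPopWhile ([]:List Int) = [] by rw [pvPopWhile]; simp]
    rw [show pvRuns ([]:List Int) = [] by rw [pvRuns]]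
    simp [pvSlice_from_neg_one_rev, hPdef, PySem.Set.empty]
  -- the sorted list and its run decomposition
  set t := PySem.List.sorted cards (fun x => x) false with htdef
  have hsp : t.Pairwise (· ≤ ·) := PySem.List.sorted_pairwise cards (fun x => x)
  have htne : t ≠ [] := by
    rw [htdef, Ne, PySem.List.sorted_eq_nil_iff]; exact hc
  have hperm : t.Perm cards := PySem.List.sorted_perm cards (fun x => x) false
  obtain ⟨u, x, k, ht, hu⟩ := pvRunDecomp t hsp htne
  have hpop : pvPopWhile t = u ++ [x] := by rw [ht]; exact pvPopWhile_spec u x k hu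
  have hs' : (u ++ [x]).Pairwise (· ≤ ·) := by
    apply List.pairwise_append.mpr
    refine ⟨?_, by simp, ?_⟩
    · exact List.Pairwise.sublist (by rw [ht]; exact List.sublist_append_left _ _) hsp
    · intro a ha b hb
      rcases List.mem_singleton.mp hb with rfl
      exact (hu a ha).le
  obtain ⟨hcnt, hpw, hmem⟩ := pvRuns_props (u ++ [x]) hs'
  set D := (pvRuns (u ++ [x])).map (·.1) with hDdef
  have hmemt' : ∀ v, v ∈ (u ++ [x]) ↔ v ∈ cards := by
    intro v
    rw [← hperm.mem_iff, ht]
    simp [List.mem_replicate]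
  have hDnodup : D.Nodup := hpw.imp ne_of_lt
  have hxD : x ∈ D := (hmem x).mpr (by simp)
  have hxcards : x ∈ cards := (hmemt' x).mp (by simp)
  -- count facts: below the max the multiset count agrees with u's count; u has no copy of x
  have hzu : List.count x u = 0 :=
    List.count_eq_zero.mpr (fun hm => absurd (hu x hm) (lt_irrefl x))
  have hcu : ∀ v, v ≠ x → cards.count v = u.count v := by
    intro v hv
    rw [← hperm.count_eq, ht, List.count_append, List.count_replicate]
    simp only [beq_iff_eq]
    rw [if_neg (fun h => hv h.symm)]
    omega
  have hcux : ∀ v, v ∈ u → (u ++ [x]).count v = cards.count v := by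
    intro v hvu
    have hvlt : v < x := hu v hvu
    have h1 : List.count v [x] = 0 :=
      List.count_eq_zero.mpr (fun hm => by simp at hm; omega)
    rw [List.count_append, h1, hcu v (by omega)]
    omega
  -- B's seen is nonempty and its max is x
  have hseenne : P.1 ≠ [] := by
    intro h
    have := (hsm x).mpr hxcards
    rw [h] at this
    exact absurd this (List.not_mem_nil)
  rw [if_neg hseenne]
  have hxub : ∀ y ∈ P.1, y ≤ x := by
    intro y hy
    have hyc : y ∈ cards := (hsm y).mp hy
    rcases List.mem_append.mp ((hmemt' y).mpr hyc) with h | h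
    · exact (hu y h).le
    · simp at h; omega
  have hmaxeq : (PySem.List.max? P.1 (fun x => x)).getD 0 = x := by
    obtain ⟨M, hM⟩ : ∃ M, PySem.List.max? P.1 (fun x => x) = some M := by
      rcases h : PySem.List.max? P.1 (fun x => x) with _ | M
      · exact absurd ((PySem.List.max?_eq_none_iff _ _).mp h) hseenne
      · exact ⟨M, rfl⟩
    rw [hM, Option.getD_some]
    have hMmem : M ∈ P.1 := PySem.List.max?_mem hM
    have hxM : x ≤ M := PySem.List.max?_isMax hM x ((hsm x).mpr hxcards)
    exact le_antisymm (hxub M hMmem) hxM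
  rw [hmaxeq]
  rw [hpop, pvFoldA, pvSlice_from_neg_one_rev]
  simp only [List.nil_append, Option.getD_some]
  set Smap := ((pvRuns (u ++ [x])).filter (fun g => g.2 > 1)).map (·.1) with hSdef
  have hSsub : Smap.Sublist D := List.Sublist.map _ List.filter_sublist
  have hSpw : Smap.Pairwise (· < ·) := hpw.sublist hSsub
  have hSnodup : Smap.Nodup := hSpw.imp ne_of_lt
  have hSmem : ∀ v, v ∈ Smap ↔ 2 ≤ cards.count v ∧ v ≠ x := by
    intro v
    constructor
    · intro hv
      obtain ⟨g, hg, rfl⟩ := List.mem_map.mp hv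
      have hgf := List.mem_filter.mp hg
      have hglen := hcnt g hgf.1
      have hgl : (1:Int) < ((u ++ [x]).count g.1 : Int) := by
        have := of_decide_eq_true hgf.2
        omega
      have hgD : g.1 ∈ D := List.mem_map_of_mem hgf.1
      have hvux : g.1 ∈ u ++ [x] := (hmem g.1).mp hgD
      rcases List.mem_append.mp hvux with hvu | hvx
      · refine ⟨?_, by have := hu g.1 hvu; omega⟩
        have := hcux g.1 hvu
        omega
      · exfalso
        rcases List.mem_singleton.mp hvx
        rw [List.count_append] at hgl
        simp [hzu] at hgl
    · rintro ⟨hv2, hvx⟩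
      have hvc : v ∈ cards := List.count_pos_iff.mp (by omega)
      have hvux : v ∈ u ++ [x] := (hmemt' v).mpr hvc
      have hvu : v ∈ u := by
        rcases List.mem_append.mp hvux with h | h
        · exact h
        · exact absurd (List.mem_singleton.mp h) hvx
      obtain ⟨g, hg, hg1⟩ := List.mem_map.mp ((hmem v).mpr hvux)
      refine List.mem_map.mpr ⟨g, List.mem_filter.mpr ⟨hg, ?_⟩, hg1⟩
      have := hcnt g hg
      have := hcux v hvu
      rw [hg1] at *
      simp only [decide_eq_true_eq]
      omega
  -- B's two sorts
  have hsorts : PySem.List.sorted P.1 (fun x => x) false = D := by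
    apply PySem.List.sorted_eq_of_perm_of_pairwise_lt
    · apply (List.perm_ext_iff_of_nodup hDnodup hsn).mpr
      intro v
      rw [hmem v, hmemt' v, hsm v]
    · exact hpw
  have hdups : PySem.List.sorted (PySem.Set.discard P.2 x) (fun x => x) true = Smap.reverse := by
    apply PySem.List.sorted_rev_eq_of_perm_of_pairwise_gt
    · apply (List.perm_ext_iff_of_nodup (List.nodup_reverse.mpr hSnodup) (PySem.Set.nodup_discard P.2 x hdn)).mpr
      intro v
      rw [List.mem_reverse, PySem.Set.mem_discard, hSmem v, hdm v]
    · exact List.pairwise_reverse.mpr (by simpa using hSpw)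
  rw [hsorts, hdups]
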